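-- pv_equiv track=rewrite | github.com/Faizullin/py-counter | py-counter/server/src/sql.py | convert_to_char
-- ===== SOURCE A (Python) =====
-- def convert_to_char(dataset):
--     dataset_label=[];
--     dataset_datasets={'gas':[],'count':[],'temp':[],'hum':[]}
--     for i in dataset:
--         dataset_label.append(int(i[0]))
--         dataset_datasets['count'].append(int(i[1]));dataset_datasets['gas'].append(int(i[2]))
--         dataset_datasets['temp'].append(int(i[3]));dataset_datasets['hum'].append(int(i[4]))
--     return dataset_label,dataset_datasets
-- ===== SOURCE B (Python) =====
-- def convert_to_char(dataset):
--     # Column-major: transpose once with zip, then convert each column.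
--     if not dataset:
--         return [], {'gas': [], 'count': [], 'temp': [], 'hum': []}
--     cols = list(zip(*dataset))
--     dataset_label = [int(x) for x in cols[0]]
--     dataset_datasets = {'gas': [int(x) for x in cols[2]],
--                         'count': [int(x) for x in cols[1]],
--                         'temp': [int(x) for x in cols[3]],
--                         'hum': [int(x) for x in cols[4]]}
--     return dataset_label, dataset_datasets
-- ===== Notes on version B (the rewrite author's own statement) =====
-- stated objective: idiomatic
-- what changed: B transposes the dataset once with zip(*dataset) and builds the label list and each dict column by a per-column comprehension, instead of A's row-major loop appending to five accumulators.
import Mathlib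
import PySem

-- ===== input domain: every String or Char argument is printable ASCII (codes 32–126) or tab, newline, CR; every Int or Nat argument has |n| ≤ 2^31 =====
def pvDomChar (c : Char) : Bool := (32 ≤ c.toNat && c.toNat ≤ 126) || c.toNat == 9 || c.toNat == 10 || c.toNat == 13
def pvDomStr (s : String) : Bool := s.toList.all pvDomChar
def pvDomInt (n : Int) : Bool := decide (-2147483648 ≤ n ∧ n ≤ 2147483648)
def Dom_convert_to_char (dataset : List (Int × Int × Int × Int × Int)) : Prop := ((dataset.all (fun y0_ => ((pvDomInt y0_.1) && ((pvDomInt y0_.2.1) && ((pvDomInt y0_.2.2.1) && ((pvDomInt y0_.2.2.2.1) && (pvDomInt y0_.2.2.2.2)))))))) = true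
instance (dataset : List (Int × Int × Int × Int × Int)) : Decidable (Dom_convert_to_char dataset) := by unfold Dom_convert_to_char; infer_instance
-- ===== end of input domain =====

-- B builds the result column-major (one transpose, then per-column conversion) instead of A's row-major append loop; objective: idiomatic, same cost.


-- ===== PORT A =====
def convert_to_char (dataset : List (Int × Int × Int × Int × Int)) : List Int × (List (String × List Int)) :=
  let init : List Int × PySem.Dict String (List Int) :=
    ([], PySem.Dict.ofList [("gas", []), ("count", []), ("temp", []), ("hum", [])])
  let st := dataset.foldl (fun st i =>
    (st.1 ++ [i.1],
      ((((st.2.modify "count" [] (· ++ [i.2.1])).modify "gas" [] (· ++ [i.2.2.1])).modify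
          "temp" [] (· ++ [i.2.2.2.1])).modify "hum" [] (· ++ [i.2.2.2.2])))) init
  (st.1, st.2.items)

-- ===== PORT B =====
def convert_to_char_alt (dataset : List (Int × Int × Int × Int × Int)) : List Int × (List (String × List Int)) :=
  match dataset with
  | [] => ([], [("gas", []), ("count", []), ("temp", []), ("hum", [])])
  | _ =>
    -- cols = zip(*dataset): column j is dataset.map (proj j)
    (dataset.map (·.1),
      [("gas", dataset.map (·.2.2.1)), ("count", dataset.map (·.2.1)),
       ("temp", dataset.map (·.2.2.2.1)), ("hum", dataset.map (·.2.2.2.2))])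

-- ===== PRECONDITION & SPEC =====
def Spec_convert_to_char (dataset : List (Int × Int × Int × Int × Int)) (out : List Int × (List (String × List Int))) : Prop := out = convert_to_char_alt dataset
instance (dataset : List (Int × Int × Int × Int × Int)) (out : List Int × (List (String × List Int))) : Decidable (Spec_convert_to_char dataset out) := by unfold Spec_convert_to_char; infer_instance

-- ===== CLAIM (what is proved, stated in full; the proofs are below) =====
def Claim_equal_convert_to_char : Prop := ∀ (dataset : List (Int × Int × Int × Int × Int)), Dom_convert_to_char dataset → Spec_convert_to_char dataset (convert_to_char dataset)

-- ===== LEMMAS AND PROOFS =====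

lemma convert_fold_inv (ds : List (Int × Int × Int × Int × Int)) (lbl g c t h : List Int) :
    ds.foldl (fun st i =>
      (st.1 ++ [i.1],
        ((((st.2.modify "count" [] (· ++ [i.2.1])).modify "gas" [] (· ++ [i.2.2.1])).modify
            "temp" [] (· ++ [i.2.2.2.1])).modify "hum" [] (· ++ [i.2.2.2.2]))))
      (lbl, PySem.Dict.mk [("gas", g), ("count", c), ("temp", t), ("hum", h)])
    = (lbl ++ ds.map (·.1),
       PySem.Dict.mk [("gas", g ++ ds.map (·.2.2.1)), ("count", c ++ ds.map (·.2.1)),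
         ("temp", t ++ ds.map (·.2.2.2.1)), ("hum", h ++ ds.map (·.2.2.2.2))]) := by
  induction ds generalizing lbl g c t h with
  | nil => simp
  | cons x xs ih =>
    simp only [List.foldl_cons, List.map_cons]
    rw [show ((((PySem.Dict.mk [("gas", g), ("count", c), ("temp", t), ("hum", h)]).modify "count" [] (· ++ [x.2.1])).modify "gas" [] (· ++ [x.2.2.1])).modify
            "temp" [] (· ++ [x.2.2.2.1])).modify "hum" [] (· ++ [x.2.2.2.2])
        = PySem.Dict.mk [("gas", g ++ [x.2.2.1]), ("count", c ++ [x.2.1]), ("temp", t ++ [x.2.2.2.1]), ("hum", h ++ [x.2.2.2.2])] from rfl]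
    rw [ih]
    simp


-- ===== VERDICT (by name: the statement is the Claim_ definition above) =====
theorem convert_to_char_spec : Claim_equal_convert_to_char := by
  intro dataset _
  show convert_to_char dataset = convert_to_char_alt dataset
  have h : convert_to_char dataset
      = (List.map (fun x => x.1) dataset,
         [("gas", List.map (fun x => x.2.2.1) dataset), ("count", List.map (fun x => x.2.1) dataset),
          ("temp", List.map (fun x => x.2.2.2.1) dataset), ("hum", List.map (fun x => x.2.2.2.2) dataset)]) := by
    simp only [convert_to_char]
    rw [show PySem.Dict.ofList [("gas", ([] : List Int)), ("count", []), ("temp", []), ("hum", [])]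
        = PySem.Dict.mk [("gas", []), ("count", []), ("temp", []), ("hum", [])] from rfl]
    rw [convert_fold_inv]
    simp [PySem.Dict.items]
  rw [h]
  cases dataset with
  | nil => rfl
  | cons x xs => rfl
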